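-- pv_equiv track=rewrite | github.com/samedovAV/Computer-Security-ELTE | solutions/week4.py | encrypt_xor_with_changing_key_by_prev_cipher_longer_key
-- ===== SOURCE A (Python) =====
-- def encrypt_xor_with_changing_key_by_prev_cipher(message, key, mode):
--     """
--     >>> encrypt_xor_with_changing_key_by_prev_cipher('Hello',123,'encrypt')
--     '3V:V9'
--     >>> encrypt_xor_with_changing_key_by_prev_cipher(encrypt_xor_with_changing_key_by_prev_cipher('Hello',123,'encrypt'),123,'decrypt')
--     'Hello'
--     >>> encrypt_xor_with_changing_key_by_prev_cipher(encrypt_xor_with_changing_key_by_prev_cipher('Cryptography',10,'encrypt'),10,'decrypt')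
--     'Cryptography'
--     """
--     res = ""
--     actual_key = key
--     for m in message:
--         new_byte_value = ord(m) ^ actual_key
--         if mode == 'encrypt':
--             actual_key = new_byte_value
--         elif mode == 'decrypt':
--             actual_key = ord(m)
--         else:
--             raise Exception(f'Unknown mode {mode}')
--         res += chr(new_byte_value)
--
--     return res
--
-- def encrypt_xor_with_changing_key_by_prev_cipher_longer_key(message, key_list, mode):
--     """
--     >>> key_list = [0x20, 0x44, 0x54,0x20]
--     >>> encrypt_xor_with_changing_key_by_prev_cipher_longer_key('abcdefg', key_list, 'encrypt')
--     'A&7D$@P'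
--     >>> encrypt_xor_with_changing_key_by_prev_cipher_longer_key('aaabbbb', key_list, 'encrypt')
--     'A%5B#GW'
--     >>> encrypt_xor_with_changing_key_by_prev_cipher_longer_key(
--     ...    encrypt_xor_with_changing_key_by_prev_cipher_longer_key('abcdefg',key_list,'encrypt'),
--     ...        key_list,'decrypt')
--     'abcdefg'
--     >>> encrypt_xor_with_changing_key_by_prev_cipher_longer_key(
--     ...    encrypt_xor_with_changing_key_by_prev_cipher_longer_key('Hellobello, it will work for a long message as well',key_list,'encrypt'),
--     ...        key_list,'decrypt')
--     'Hellobello, it will work for a long message as well'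
--     """
--     res = ""
--
--     key_len = len(key_list)
--     chunks = [message[i::key_len] for i in range(key_len)]
--     chunks_ciphers = []
--     for i in range(key_len):
--         chunks_ciphers.append(encrypt_xor_with_changing_key_by_prev_cipher(chunks[i], key_list[i], mode))
--
--     for i in range(len(message)):
--         which_chunk = i % key_len
--         character_num = i // key_len
--
--         res += chunks_ciphers[which_chunk][character_num]
--
--     return res
-- ===== SOURCE B (Python) =====
-- def encrypt_xor_with_changing_key_by_prev_cipher_longer_key(message, key_list, mode):
--     # Single linear pass over the message with a rolling key table,
--     # instead of A's chunk-split / per-chunk cipher / reinterleave.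
--     keys = list(key_list)
--     key_len = len(key_list)
--     out = []
--     for i, ch in enumerate(message):
--         c = i % key_len
--         new = ord(ch) ^ keys[c]
--         if mode == 'encrypt':
--             keys[c] = new
--         elif mode == 'decrypt':
--             keys[c] = ord(ch)
--         else:
--             raise Exception(f'Unknown mode {mode}')
--         out.append(chr(new))
--     return ''.join(out)
-- ===== Notes on version B (the rewrite author's own statement) =====
-- stated objective: simpler
-- what changed: B replaces A's chunk-split into key_len strided substrings, per-chunk chained XOR cipher and index-arithmetic reinterleave by one linear pass over the message in original order that maintains a rolling key per residue class.
-- outside the precondition, e.g. on encrypt_xor_with_changing_key_by_prev_cipher_longer_key('a', [65, 55296], 'encrypt'): A returns ' ', B returns ' '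
import Mathlib
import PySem

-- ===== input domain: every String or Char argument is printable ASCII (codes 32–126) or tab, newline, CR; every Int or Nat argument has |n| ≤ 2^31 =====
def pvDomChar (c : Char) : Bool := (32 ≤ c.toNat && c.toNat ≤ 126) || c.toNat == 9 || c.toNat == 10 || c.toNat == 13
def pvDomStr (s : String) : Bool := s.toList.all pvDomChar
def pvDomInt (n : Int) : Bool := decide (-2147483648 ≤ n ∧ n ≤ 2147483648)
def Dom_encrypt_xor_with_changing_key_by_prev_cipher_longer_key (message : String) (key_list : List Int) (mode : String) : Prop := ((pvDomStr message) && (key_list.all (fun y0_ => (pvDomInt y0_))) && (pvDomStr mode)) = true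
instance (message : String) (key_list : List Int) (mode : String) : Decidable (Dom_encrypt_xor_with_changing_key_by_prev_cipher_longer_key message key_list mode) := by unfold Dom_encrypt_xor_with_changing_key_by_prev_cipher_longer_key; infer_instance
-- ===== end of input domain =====

-- B replaces A's chunk-split / per-chunk chained XOR / reinterleave by one linear pass with a
-- rolling key per residue class (objective: simpler; same output, no observable mutation).


-- ===== PORT A =====
-- ord(c)
def pvOrd (c : Char) : Int := (c.toNat : Int)

-- chr(n): none exactly where Python's chr raises ValueError, and additionally on the surrogate
-- range U+D800..U+DFFF, whose code points Python returns but a Lean Char cannot represent;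
-- both regions are excluded by Pre_ below.
def pvChr? (n : Int) : Option Char :=
  if _h : 0 ≤ n ∧ n.toNat.isValidChar then some (Char.ofNat n.toNat) else none

-- port of the helper encrypt_xor_with_changing_key_by_prev_cipher; none = raise (unknown mode / chr)
def pvChainA (mode : String) : List Char → Int → Option (List Char)
  | [], _ => some []
  | m :: rest, actual_key =>
    let nb := PySem.Int.bxor (pvOrd m) actual_key
    if mode = "encrypt" then
      match pvChr? nb, pvChainA mode rest nb with
      | some c, some tl => some (c :: tl)
      | _, _ => none
    else if mode = "decrypt" then
      match pvChr? nb, pvChainA mode rest (pvOrd m) with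
      | some c, some tl => some (c :: tl)
      | _, _ => none
    else none

-- the `for i in range(key_len): chunks_ciphers.append(...)` loop
def pvCiphersA (mode : String) (chunks : List (List Char)) (key_list : List Int) :
    List Int → Option (List (List Char))
  | [] => some []
  | i :: is =>
    match pvChainA mode (PySem.List.pyGetD chunks i []) (PySem.List.pyGetD key_list i 0) with
    | none => none
    | some c =>
      match pvCiphersA mode chunks key_list is with
      | none => none
      | some cs => some (c :: cs)

-- the `for i in range(len(message)): res += ...` loop; mod?/floordiv? are none on key_len = 0
def pvAssembleA (ciphers : List (List Char)) (key_len : Int) : List Int → Option (List Char)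
  | [] => some []
  | i :: is =>
    match PySem.Int.mod? i key_len, PySem.Int.floordiv? i key_len with
    | some wc, some cn =>
      (match PySem.List.pyGet? ciphers wc with
      | none => none
      | some cipher =>
        match PySem.List.pyGet? cipher cn with
        | none => none
        | some ch =>
          match pvAssembleA ciphers key_len is with
          | none => none
          | some tl => some (ch :: tl))
    | _, _ => none

def encrypt_xor_with_changing_key_by_prev_cipher_longer_key (message : String) (key_list : List Int) (mode : String) : String :=
  let ms := message.toList
  let key_len := key_list.length
  let chunks := (PySem.List.pyRange 0 (key_len : Int) 1).map
    (fun i => (PySem.List.slice? ms (some i) none (key_len : Int)).getD [])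
  match pvCiphersA mode chunks key_list (PySem.List.pyRange 0 (key_len : Int) 1) with
  | none => ""   -- a raise while building the chunk ciphers; outside Pre_
  | some ciphers =>
    match pvAssembleA ciphers (key_len : Int) (PySem.List.pyRange 0 (ms.length : Int) 1) with
    | none => ""  -- ZeroDivisionError on empty key_list; outside Pre_
    | some res => String.ofList res

-- ===== PORT B =====
-- Source B's single loop: index i, rolling key table `keys`, output accumulated front-to-back
def pvAltLoop (mode : String) (key_len : Int) : List Char → Nat → List Int → Option (List Char)
  | [], _, _ => some []
  | ch :: rest, i, keys =>
    match PySem.Int.mod? (i : Int) key_len with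
    | none => none
    | some c =>
      let nb := PySem.Int.bxor (pvOrd ch) (PySem.List.pyGetD keys c 0)
      if mode = "encrypt" then
        match pvChr? nb, pvAltLoop mode key_len rest (i + 1) (PySem.List.pySetD keys c nb) with
        | some o, some tl => some (o :: tl)
        | _, _ => none
      else if mode = "decrypt" then
        match pvChr? nb, pvAltLoop mode key_len rest (i + 1) (PySem.List.pySetD keys c (pvOrd ch)) with
        | some o, some tl => some (o :: tl)
        | _, _ => none
      else none

def encrypt_xor_with_changing_key_by_prev_cipher_longer_key_alt (message : String) (key_list : List Int) (mode : String) : String :=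
  match pvAltLoop mode (key_list.length : Int) message.toList 0 key_list with
  | some out => String.ofList out
  | none => ""

-- ===== PRECONDITION & SPEC =====
-- Pre_ excludes exactly: (a) inputs where A raises — a nonempty message with an unknown mode
-- (Exception), an empty key_list (ZeroDivisionError), or a key that is negative or ≥ 0x110000
-- (chr ValueError) — and (b) keys in the surrogate range 0xD800–0xDFFF, on which A returns a
-- string containing lone-surrogate code points that a Lean Char/String cannot represent.
def Pre_encrypt_xor_with_changing_key_by_prev_cipher_longer_key (message : String) (key_list : List Int) (mode : String) : Prop :=
  message.toList = [] ∨
    (key_list ≠ [] ∧ (mode = "encrypt" ∨ mode = "decrypt") ∧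
      ∀ k ∈ key_list, 0 ≤ k ∧ (k < 55296 ∨ (57344 ≤ k ∧ k < 1114112)))

instance (message : String) (key_list : List Int) (mode : String) : Decidable (Pre_encrypt_xor_with_changing_key_by_prev_cipher_longer_key message key_list mode) := by unfold Pre_encrypt_xor_with_changing_key_by_prev_cipher_longer_key; infer_instance

def pvWitness_encrypt_xor_with_changing_key_by_prev_cipher_longer_key : String × List Int × String :=
  ("Hello", [32, 68, 84, 32], "encrypt")

def Spec_encrypt_xor_with_changing_key_by_prev_cipher_longer_key (message : String) (key_list : List Int) (mode : String) (out : String) : Prop := out = encrypt_xor_with_changing_key_by_prev_cipher_longer_key_alt message key_list mode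
instance (message : String) (key_list : List Int) (mode : String) (out : String) : Decidable (Spec_encrypt_xor_with_changing_key_by_prev_cipher_longer_key message key_list mode out) := by unfold Spec_encrypt_xor_with_changing_key_by_prev_cipher_longer_key; infer_instance

-- ===== CLAIM (what is proved, stated in full; the proofs are below) =====
def Claim_equal_encrypt_xor_with_changing_key_by_prev_cipher_longer_key : Prop := ∀ (message : String) (key_list : List Int) (mode : String), Dom_encrypt_xor_with_changing_key_by_prev_cipher_longer_key message key_list mode → Pre_encrypt_xor_with_changing_key_by_prev_cipher_longer_key message key_list mode → Spec_encrypt_xor_with_changing_key_by_prev_cipher_longer_key message key_list mode (encrypt_xor_with_changing_key_by_prev_cipher_longer_key message key_list mode)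

-- ===== LEMMAS AND PROOFS =====

-- total chr on valid inputs
def pvChrU (n : Int) : Char := Char.ofNat n.toNat

-- "good key": XORing it with a 7-bit byte always yields a valid non-surrogate code point
def pvOk (k : Int) : Prop := 0 ≤ k ∧ (k < 55296 ∨ (57344 ≤ k ∧ k < 1114112))

def pvOkMsg (ms : List Char) : Prop := ∀ c ∈ ms, c.toNat < 128

-- total chained cipher (A's helper without the raise paths)
def chainT (enc : Bool) : List Char → Int → List Char
  | [], _ => []
  | m :: rest, k =>
    let nb := PySem.Int.bxor (pvOrd m) k
    pvChrU nb :: chainT enc rest (if enc then nb else pvOrd m)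

-- every K-th element, starting at the head (= xs[::K])
def everyK (K : Nat) : List Char → List Char
  | [] => []
  | x :: xs => x :: everyK K (xs.drop (K - 1))
  termination_by l => l.length
  decreasing_by simp only [List.length_drop, List.length_cons]; omega

-- reference: flat pass with a rotating key queue
def rotC (enc : Bool) : List Char → List Int → List Char
  | [], _ => []
  | _ :: _, [] => []
  | m :: rest, k :: ks =>
    let nb := PySem.Int.bxor (pvOrd m) k
    pvChrU nb :: rotC enc rest (ks ++ [if enc then nb else pvOrd m])

def ciphersT (enc : Bool) (K : Nat) (ms : List Char) (keys : List Int) : List (List Char) :=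
  (List.range K).map (fun c => chainT enc (everyK K (ms.drop c)) (keys.getD c 0))

def interT (n K : Nat) (ciphers : List (List Char)) : List Char :=
  (List.range n).map (fun i => ((ciphers.getD (i % K) []).getD (i / K) (Char.ofNat 0)))

lemma xor_split (a b o : Nat) (hb : b < 128) (ho : o < 128) :
    (2 ^ 7 * a + b) ^^^ o = 2 ^ 7 * a + (b ^^^ o) := by
  apply Nat.eq_of_testBit_eq
  intro i
  have hxo : b ^^^ o < 2 ^ 7 := Nat.xor_lt_two_pow (by omega) (by omega)
  rw [Nat.testBit_xor, Nat.testBit_two_pow_mul_add a (by omega : b < 2 ^ 7) i,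
      Nat.testBit_two_pow_mul_add a hxo i]
  by_cases hi : i < 7
  · simp [hi, Nat.testBit_xor]
  · simp [hi, Nat.testBit_lt_two_pow (show o < 2 ^ i by
      calc o < 2 ^ 7 := by omega
      _ ≤ 2 ^ i := Nat.pow_le_pow_right (by omega) (by omega))]

lemma xor_div128 (k o : Nat) (ho : o < 128) : (k ^^^ o) / 128 = k / 128 := by
  have hm : k % 128 < 128 := Nat.mod_lt _ (by norm_num)
  have h2 : k % 128 ^^^ o < 128 := Nat.xor_lt_two_pow (n := 7) (by omega) (by omega)
  have h3 : (2 ^ 7 * (k / 128) + k % 128) ^^^ o = 2 ^ 7 * (k / 128) + (k % 128 ^^^ o) :=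
    xor_split _ _ _ hm ho
  have h1 : 2 ^ 7 * (k / 128) + k % 128 = k := by
    have := Nat.div_add_mod k 128; omega
  have d1 : (2 ^ 7 * (k / 128) + (k % 128 ^^^ o)) / 2 ^ 7 = k / 128 + (k % 128 ^^^ o) / 2 ^ 7 :=
    Nat.mul_add_div (by norm_num) _ _
  have d2 : (2 ^ 7 * (k / 128) + k % 128) / 2 ^ 7 = k / 128 + (k % 128) / 2 ^ 7 :=
    Nat.mul_add_div (by norm_num) _ _
  have hx : k ^^^ o = 2 ^ 7 * (k / 128) + (k % 128 ^^^ o) := by rw [← h3, h1]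
  rw [hx]
  show (2 ^ 7 * (k / 128) + (k % 128 ^^^ o)) / 2 ^ 7 = k / 128
  rw [d1, Nat.div_eq_of_lt (show k % 128 ^^^ o < 2 ^ 7 by omega)]
  omega

lemma pvOk_xor (k : Int) (o : Nat) (hk : pvOk k) (ho : o < 128) :
    pvOk (PySem.Int.bxor (o : Int) k) := by
  obtain ⟨hk0, hkr⟩ := hk
  rw [PySem.Int.bxor_of_nonneg (by positivity) hk0]
  have hc : ((o : Int)).toNat = o := by omega
  rw [hc]
  have hK : ((k.toNat : Int)) = k := Int.toNat_of_nonneg hk0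
  set K := k.toNat with hKdef
  have hd : (o ^^^ K) / 128 = K / 128 := by rw [Nat.xor_comm]; exact xor_div128 _ _ ho
  have d1 := Nat.div_add_mod K 128
  have d2 := Nat.div_add_mod (o ^^^ K) 128
  have m1 : K % 128 < 128 := Nat.mod_lt _ (by norm_num)
  have m2 : (o ^^^ K) % 128 < 128 := Nat.mod_lt _ (by norm_num)
  refine ⟨Int.natCast_nonneg _, ?_⟩
  rcases hkr with h | h
  · left; omega
  · right; omega

lemma pvChr?_ok (n : Int) (h : pvOk n) : pvChr? n = some (pvChrU n) := by
  obtain ⟨h0, hr⟩ := h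
  rw [pvChr?, dif_pos ⟨h0, by unfold Nat.isValidChar; omega⟩, pvChrU]

lemma chainA_eq (mode : String) (enc : Bool)
    (hm : (mode = "encrypt" ∧ enc = true) ∨ (mode = "decrypt" ∧ enc = false)) :
    ∀ (chunk : List Char) (k : Int), pvOk k → pvOkMsg chunk →
      pvChainA mode chunk k = some (chainT enc chunk k) := by
  intro chunk
  induction chunk with
  | nil => intro k _ _; rfl
  | cons m rest ih =>
    intro k hk hmsg
    have hm0 : m.toNat < 128 := hmsg m (by simp)
    have hnb : pvOk (PySem.Int.bxor (pvOrd m) k) := pvOk_xor k m.toNat hk hm0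
    have hrest : pvOkMsg rest := fun c hc => hmsg c (by simp [hc])
    rcases hm with ⟨h1, h2⟩ | ⟨h1, h2⟩ <;> subst h1 <;> subst h2
    · simp [pvChainA, chainT, pvChr?_ok _ hnb, ih _ hnb hrest]
    · have hordok : pvOk (pvOrd m) := ⟨Int.natCast_nonneg _, Or.inl (by simp only [pvOrd]; omega)⟩
      simp [pvChainA, chainT, pvChr?_ok _ hnb, ih _ hordok hrest]

lemma length_chainT (enc : Bool) : ∀ (l : List Char) (k : Int), (chainT enc l k).length = l.length := by
  intro l
  induction l with
  | nil => intro k; rfl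
  | cons m rest ih => intro k; simp [chainT, ih]

lemma length_everyK (K : Nat) (hK : 0 < K) :
    ∀ (l : List Char), (everyK K l).length = (l.length + K - 1) / K := by
  intro l
  induction l using everyK.induct K with
  | case1 => rw [everyK]; simp [Nat.div_eq_of_lt (show K - 1 < K by omega)]
  | case2 x xs ih =>
    rw [everyK]
    simp only [List.length_cons, List.length_drop, ih, List.length_drop]
    by_cases h : K - 1 ≤ xs.length
    · have e1 : xs.length - (K - 1) + K - 1 = xs.length := by omega
      have e2 : xs.length + 1 + K - 1 = xs.length + K := by omega
      rw [e1, e2, Nat.add_div_right _ hK]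
    · have e1 : xs.length - (K - 1) + K - 1 = K - 1 := by omega
      have e2 : xs.length + 1 + K - 1 = xs.length + K := by omega
      rw [e1, e2, Nat.add_div_right _ hK, Nat.div_eq_of_lt (by omega), Nat.div_eq_of_lt (by omega)]

lemma everyK_filterMap (K : Nat) (hK : 0 < K) :
    ∀ (ys : List Char),
      (List.range ((ys.length + K - 1) / K)).filterMap (fun k => ys[K * k]?) = everyK K ys := by
  intro ys
  induction ys using everyK.induct K with
  | case1 => rw [everyK]; simp
  | case2 y t ih =>
    have hcnt : (t.length + 1 + K - 1) / K = t.length / K + 1 := by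
      have e : t.length + 1 + K - 1 = t.length + K := by omega
      rw [e, Nat.add_div_right _ hK]
    have hcnt2 : ((t.drop (K - 1)).length + K - 1) / K = t.length / K := by
      simp only [List.length_drop]
      by_cases h : K - 1 ≤ t.length
      · have e : t.length - (K - 1) + K - 1 = t.length := by omega
        rw [e]
      · have e : t.length - (K - 1) + K - 1 = K - 1 := by omega
        rw [e, Nat.div_eq_of_lt (by omega), Nat.div_eq_of_lt (by omega)]
    rw [List.length_cons, hcnt, List.range_succ_eq_map, List.filterMap_cons, everyK]
    simp only [Nat.mul_zero, List.getElem?_cons_zero, List.filterMap_map]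
    rw [hcnt2] at ih
    rw [← ih]
    congr 1
    apply List.filterMap_congr
    intro k _
    have e : K * (Nat.succ k) = (K - 1 + K * k) + 1 := by
      have := Nat.mul_succ K k; omega
    simp only [Function.comp_apply, e, List.getElem?_cons_succ, List.getElem?_drop]

lemma slice?_everyK (xs : List Char) (c K : Nat) (hK : 0 < K) :
    PySem.List.slice? xs (some (c : Int)) none (K : Int) = some (everyK K (xs.drop c)) := by
  have hKne : (K : Int) ≠ 0 := by omega
  rw [PySem.List.slice?, if_neg hKne, PySem.List.sliceIndices]
  simp only [if_neg (show ¬((K : Int) < 0) by omega), if_neg (show ¬((c : Int)) < 0 by omega)]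
  set n := xs.length with hn
  have hmin : min (c : Int) (n : Int) = ((min c n : Nat) : Int) := by omega
  have hdropmin : xs.drop c = xs.drop (min c n) := by
    rcases Nat.le_total c n with h | h
    · rw [Nat.min_eq_left h]
    · rw [Nat.min_eq_right h, List.drop_eq_nil_of_le h, List.drop_eq_nil_of_le (le_refl n)]
  set c' := min c n with hc'
  have hc'n : c' ≤ n := by omega
  have hcount : (if ((min (c:Int) (n:Int)) : Int) < (n:Int) then (((n:Int) - min (c:Int) (n:Int) + (K:Int) - 1) / (K:Int)).toNat else 0)
      = ((xs.drop c').length + K - 1) / K := by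
    simp only [List.length_drop]
    by_cases h : c' < n
    · rw [if_pos (by rw [hmin]; exact_mod_cast h), hmin]
      have e1 : (n : Int) - (c' : Int) + (K : Int) - 1 = ((n - c' + K - 1 : Nat) : Int) := by omega
      rw [e1, show ((n - c' + K - 1 : Nat) : Int) / (K : Int) = (((n - c' + K - 1) / K : Nat) : Int)
        from (Int.natCast_div _ _).symm, Int.toNat_natCast, hn]
    · rw [if_neg (by rw [hmin]; exact_mod_cast h)]
      have e : n - c' = 0 := by omega
      rw [e]
      exact (Nat.div_eq_of_lt (by omega)).symm
  rw [hcount]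
  rw [if_pos (show (0 : Int) < (K : Int) by exact_mod_cast hK)]
  rw [hdropmin, ← everyK_filterMap K hK (xs.drop c')]
  congr 1
  apply List.filterMap_congr
  intro x _
  rw [List.getElem?_drop]
  congr 1
  rw [hmin]
  have e : ((c' : Int) + (K : Int) * (x : Int)) = ((c' + K * x : Nat) : Int) := by push_cast; ring
  rw [e, Int.toNat_natCast]

lemma mem_everyK (K : Nat) : ∀ (l : List Char) (x : Char), x ∈ everyK K l → x ∈ l := by
  intro l
  induction l using everyK.induct K with
  | case1 => intro x hx; rw [everyK] at hx; exact hx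
  | case2 y t ih =>
    intro x hx
    rw [everyK] at hx
    rcases List.mem_cons.mp hx with h | h
    · simp [h]
    · exact List.mem_cons_of_mem _ (List.mem_of_mem_drop (ih x h))

lemma pvModNat (i K : Nat) (hK : 0 < K) :
    PySem.Int.mod? (i : Int) (K : Int) = some ((i % K : Nat) : Int) := by
  rw [PySem.Int.mod?]
  rw [if_neg (show (K : Int) ≠ 0 by omega)]
  congr 1
  rw [Int.fmod_eq_emod, if_pos (Or.inl (by positivity))]
  push_cast
  omega

lemma pvDivNat (i K : Nat) (hK : 0 < K) :
    PySem.Int.floordiv? (i : Int) (K : Int) = some ((i / K : Nat) : Int) := by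
  rw [PySem.Int.floordiv?]
  rw [if_neg (show (K : Int) ≠ 0 by omega)]
  congr 1
  rw [Int.fdiv_eq_ediv, if_pos (Or.inl (by positivity))]
  omega

lemma rotate_set (keys : List Int) (c : Nat) (v : Int) (hc : c < keys.length) :
    (keys.set c v).rotate ((c + 1) % keys.length) = keys.drop (c + 1) ++ keys.take c ++ [v] := by
  by_cases h : c + 1 < keys.length
  · rw [Nat.mod_eq_of_lt h, List.rotate_eq_drop_append_take (by rw [List.length_set]; omega)]
    rw [List.drop_set, if_pos (by omega), List.take_set, List.set_eq_take_append_cons_drop,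
        if_pos (by rw [List.length_take]; omega)]
    rw [List.take_take, Nat.min_eq_left (by omega : c ≤ c + 1)]
    rw [List.drop_take, Nat.sub_self, List.take_zero, List.append_assoc]
  · have hc1 : c + 1 = keys.length := by omega
    rw [hc1, Nat.mod_self, List.rotate_zero, List.set_eq_take_append_cons_drop, if_pos hc]
    rw [List.drop_eq_nil_of_le (by omega)]
    simp

lemma rotate_head (keys : List Int) (c : Nat) (hc : c < keys.length) :
    keys.rotate c = keys[c] :: (keys.drop (c + 1) ++ keys.take c) := by
  rw [List.rotate_eq_drop_append_take (le_of_lt hc), List.drop_eq_getElem_cons hc]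
  rfl

lemma altLoop_eq_rotC (mode : String) (enc : Bool)
    (hm : (mode = "encrypt" ∧ enc = true) ∨ (mode = "decrypt" ∧ enc = false)) :
    ∀ (ms : List Char) (i : Nat) (keys : List Int), 0 < keys.length →
      (∀ k ∈ keys, pvOk k) → pvOkMsg ms →
      pvAltLoop mode (keys.length : Int) ms i keys
        = some (rotC enc ms (keys.rotate (i % keys.length))) := by
  intro ms
  induction ms with
  | nil => intro i keys hK hok hmsg; rw [pvAltLoop, rotC]
  | cons ch rest ih =>
    intro i keys hKpos hok hmsg
    set K := keys.length with hKdef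
    set c := i % K with hc
    have hcK : c < K := Nat.mod_lt _ hKpos
    have hch : ch.toNat < 128 := hmsg ch (by simp)
    have hkeyc : keys.getD c 0 = keys[c]'hcK := List.getD_eq_getElem keys 0 hcK
    have hokc : pvOk (keys[c]'hcK) := hok _ (List.getElem_mem hcK)
    have hnbok : pvOk (PySem.Int.bxor (pvOrd ch) (keys[c]'hcK)) := pvOk_xor _ ch.toNat hokc hch
    have hrest : pvOkMsg rest := fun x hx => hmsg x (by simp [hx])
    have hset : ∀ (v : Int), PySem.List.pySetD keys ((c : Nat) : Int) v = keys.set c v := by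
      intro v
      rw [PySem.List.pySetD_of_nonneg keys v (Int.natCast_nonneg _)]
      simp
    have hsetlen : ∀ (v : Int), (keys.set c v).length = K := by intro v; simp [hKdef]
    have hmod : (i + 1) % K = (c + 1) % K := by rw [hc, Nat.mod_add_mod]
    have hrotr : keys.rotate c = keys[c]'hcK :: (keys.drop (c + 1) ++ keys.take c) :=
      rotate_head keys c hcK
    rw [pvAltLoop, pvModNat i K hKpos, ← hc]
    simp only [PySem.List.pyGetD_natCast, hkeyc]
    have hout : rotC enc (ch :: rest) (keys.rotate c)
        = pvChrU (PySem.Int.bxor (pvOrd ch) (keys[c]'hcK))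
          :: rotC enc rest ((keys.drop (c + 1) ++ keys.take c)
              ++ [if enc then PySem.Int.bxor (pvOrd ch) (keys[c]'hcK) else pvOrd ch]) := by
      rw [hrotr, rotC]
    have hstep : ∀ (v : Int), pvOk v →
        pvAltLoop mode (K : Int) rest (i + 1) (keys.set c v)
          = some (rotC enc rest ((keys.drop (c + 1) ++ keys.take c) ++ [v])) := by
      intro v hv
      have hok' : ∀ k ∈ keys.set c v, pvOk k := by
        intro x hx
        rcases List.mem_or_eq_of_mem_set hx with h | h
        · exact hok x h
        · rw [h]; exact hv
      have := ih (i + 1) (keys.set c v) (by rw [hsetlen]; exact hKpos) hok' hrest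
      rw [hsetlen] at this
      rw [this, hmod, rotate_set keys c v hcK]
    rcases hm with ⟨h1, h2⟩ | ⟨h1, h2⟩ <;> subst h1 <;> subst h2
    · rw [hout]
      simp only [if_true]
      rw [hset, hstep _ hnbok, pvChr?_ok _ hnbok]
    · rw [hout]
      have hordok : pvOk (pvOrd ch) := ⟨Int.natCast_nonneg _, Or.inl (by simp only [pvOrd]; omega)⟩
      rw [if_neg (by decide), if_pos rfl, hset, hstep _ hordok, pvChr?_ok _ hnbok]
      simp

lemma interT_eq_rotC (enc : Bool) :
    ∀ (ms : List Char) (keys : List Int), keys ≠ [] →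
      interT ms.length keys.length (ciphersT enc keys.length ms keys) = rotC enc ms keys := by
  intro ms
  induction ms with
  | nil => intro keys h; rw [interT, rotC]; simp
  | cons m rest ih =>
    intro keys hne
    obtain ⟨k, ks, rfl⟩ : ∃ k ks, keys = k :: ks := by
      cases keys with
      | nil => exact absurd rfl hne
      | cons a l => exact ⟨a, l, rfl⟩
    set K := (k :: ks).length with hKdef
    have hKpos : 0 < K := by simp [hKdef]
    have hks : ks.length = K - 1 := by simp [hKdef]
    set nb := PySem.Int.bxor (pvOrd m) k with hnbdef
    set k' := if enc then nb else pvOrd m with hk'def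
    set keys' : List Int := ks ++ [k'] with hkeys'def
    have hKlen' : keys'.length = K := by simp [hkeys'def, hKdef]
    have hne' : keys' ≠ [] := by simp [hkeys'def]
    have ihr := ih keys' hne'
    rw [hKlen'] at ihr
    have hrot : rotC enc (m :: rest) (k :: ks) = pvChrU nb :: rotC enc rest keys' := by
      rw [rotC]
    rw [hrot, ← ihr]
    have hgetC : ∀ (c : Nat), c < K →
        (ciphersT enc K (m :: rest) (k :: ks)).getD c []
          = chainT enc (everyK K ((m :: rest).drop c)) ((k :: ks).getD c 0) := by
      intro c hcK
      exact PySem.List.getD_map_range _ K c [] hcK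
    have hgetC' : ∀ (c : Nat), c < K →
        (ciphersT enc K rest keys').getD c []
          = chainT enc (everyK K (rest.drop c)) (keys'.getD c 0) := by
      intro c hcK
      exact PySem.List.getD_map_range _ K c [] hcK
    have hhead : (ciphersT enc K (m :: rest) (k :: ks)).getD 0 []
        = pvChrU nb :: chainT enc (everyK K (rest.drop (K - 1))) k' := by
      rw [hgetC 0 hKpos, List.drop_zero, List.getD_cons_zero, everyK, chainT]
    have hstep : ∀ (i : Nat), 1 ≤ i →
        ((ciphersT enc K (m :: rest) (k :: ks)).getD (i % K) []).getD (i / K) (Char.ofNat 0)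
          = ((ciphersT enc K rest keys').getD ((i - 1) % K) []).getD ((i - 1) / K) (Char.ofNat 0) := by
      intro i hi
      have hcK : i % K < K := Nat.mod_lt _ hKpos
      have hdm := Nat.div_add_mod i K
      by_cases hc0 : i % K = 0
      · have hqpos : 1 ≤ i / K := by
          rcases Nat.eq_zero_or_pos (i / K) with h | h
          · have := hdm
            rw [h, Nat.mul_zero] at this
            omega
          · exact h
        have hKle : K * 1 ≤ K * (i / K) := Nat.mul_le_mul_left K hqpos
        have hq : i - 1 = K * (i / K - 1) + (K - 1) := by
          have e : K * (i / K - 1) = K * (i / K) - K := by rw [Nat.mul_sub, Nat.mul_one]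
          omega
        have h1 : (i - 1) % K = K - 1 := by
          rw [hq, Nat.mul_add_mod, Nat.mod_eq_of_lt (show K - 1 < K by omega)]
        have h2 : (i - 1) / K = i / K - 1 := by
          rw [hq, Nat.mul_add_div hKpos, Nat.div_eq_of_lt (show K - 1 < K by omega), Nat.add_zero]
        have hk'get : keys'.getD (K - 1) 0 = k' := by
          rw [hkeys'def, List.getD_append_right _ _ _ _ (by omega), hks]
          simp
        rw [hc0, h1, h2, hhead, hgetC' (K - 1) (by omega), hk'get]
        have e : i / K = (i / K - 1) + 1 := by omega
        rw [e, List.getD_cons_succ]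
        have e2 : i / K - 1 + 1 - 1 = i / K - 1 := by omega
        rw [e2]
      · obtain ⟨c', hc'⟩ : ∃ c', i % K = c' + 1 := ⟨i % K - 1, by omega⟩
        have hq : i - 1 = K * (i / K) + c' := by omega
        have h1 : (i - 1) % K = c' := by
          rw [hq, Nat.mul_add_mod, Nat.mod_eq_of_lt (show c' < K by omega)]
        have h2 : (i - 1) / K = i / K := by
          rw [hq, Nat.mul_add_div hKpos, Nat.div_eq_of_lt (show c' < K by omega), Nat.add_zero]
        have hget' : keys'.getD c' 0 = ks.getD c' 0 := by
          rw [hkeys'def, List.getD_append _ _ _ _ (by omega)]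
        rw [hc', h1, h2, hgetC (c' + 1) (by omega), hgetC' c' (by omega), hget',
            List.drop_succ_cons, List.getD_cons_succ]
    rw [interT, interT]
    simp only [List.length_cons]
    rw [List.range_succ_eq_map, List.map_cons, List.map_map]
    congr 1
    · rw [Nat.zero_mod, Nat.zero_div, hhead, List.getD_cons_zero]
    · apply List.map_congr_left
      intro j _
      have := hstep (j + 1) (by omega)
      simpa using this

lemma ciphersA_eq (mode : String) (enc : Bool)
    (hm : (mode = "encrypt" ∧ enc = true) ∨ (mode = "decrypt" ∧ enc = false))
    (chunksL : List (List Char)) (keys : List Int) :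
    ∀ (cs : List Nat), (∀ c ∈ cs, pvOk (keys.getD c 0) ∧ pvOkMsg (chunksL.getD c [])) →
      pvCiphersA mode chunksL keys (cs.map (fun (c : Nat) => (c : Int)))
        = some (cs.map (fun c => chainT enc (chunksL.getD c []) (keys.getD c 0))) := by
  intro cs
  induction cs with
  | nil => intro _; rfl
  | cons c cs ih =>
    intro h
    obtain ⟨hok, hmsg⟩ := h c (by simp)
    have hA : pvChainA mode (chunksL.getD c []) (keys.getD c 0)
        = some (chainT enc (chunksL.getD c []) (keys.getD c 0)) :=
      chainA_eq mode enc hm _ _ hok hmsg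
    have hI := ih (fun x hx => h x (by simp [hx]))
    simp only [List.map_cons, pvCiphersA, PySem.List.pyGetD_natCast, hA, hI]

lemma assembleA_eq (ciphers : List (List Char)) (K : Nat) (hK : 0 < K) :
    ∀ (is : List Nat),
      (∀ i ∈ is, i % K < ciphers.length ∧ i / K < (ciphers.getD (i % K) []).length) →
      pvAssembleA ciphers (K : Int) (is.map (fun (i : Nat) => (i : Int)))
        = some (is.map (fun i => (ciphers.getD (i % K) []).getD (i / K) (Char.ofNat 0))) := by
  intro is
  induction is with
  | nil => intro _; rfl
  | cons i is ih =>
    intro h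
    obtain ⟨h1, h2⟩ := h i (by simp)
    have e1 : ciphers[i % K]'h1 = ciphers.getD (i % K) [] := (List.getD_eq_getElem _ _ h1).symm
    have h2' : i / K < (ciphers[i % K]'h1).length := by rw [e1]; exact h2
    have g1 : PySem.List.pyGet? ciphers (((i % K : Nat)) : Int) = some (ciphers[i % K]'h1) := by
      rw [PySem.List.pyGet?_natCast, List.getElem?_eq_getElem h1]
    have g2 : PySem.List.pyGet? (ciphers[i % K]'h1) (((i / K : Nat)) : Int)
        = some ((ciphers[i % K]'h1)[i / K]'h2') := by
      rw [PySem.List.pyGet?_natCast, List.getElem?_eq_getElem h2']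
    have hI := ih (fun x hx => h x (by simp [hx]))
    simp only [List.map_cons, pvAssembleA, pvModNat i K hK, pvDivNat i K hK, g1, g2, hI]
    have e2 : (ciphers[i % K]'h1)[i / K]'h2' = (ciphers.getD (i % K) []).getD (i / K) (Char.ofNat 0) := by
      rw [← e1]
      exact (List.getD_eq_getElem _ _ h2').symm
    rw [e2]

lemma dom_okMsg (message : String) (h : pvDomStr message = true) : pvOkMsg message.toList := by
  intro c hc
  have := List.all_eq_true.mp h c hc
  simp only [pvDomChar, Bool.or_eq_true, Bool.and_eq_true, decide_eq_true_eq, beq_iff_eq] at this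
  omega

lemma getD_all_nil (chunks : List (List Char)) (h : ∀ l ∈ chunks, l = []) :
    ∀ (i : Int), PySem.List.pyGetD chunks i [] = [] := by
  intro i
  rw [PySem.List.pyGetD]
  cases hg : PySem.List.pyGet? chunks i with
  | none => rfl
  | some l => exact h l (PySem.List.mem_of_pyGet?_eq_some chunks hg)

lemma ciphersA_nil (mode : String) (chunks : List (List Char)) (keys : List Int)
    (h : ∀ l ∈ chunks, l = []) :
    ∀ (is : List Int), ∃ out, pvCiphersA mode chunks keys is = some out := by
  intro is
  induction is with
  | nil => exact ⟨[], rfl⟩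
  | cons i is ih =>
    obtain ⟨out, hout⟩ := ih
    refine ⟨[] :: out, ?_⟩
    rw [pvCiphersA, getD_all_nil chunks h i]
    rw [show pvChainA mode [] (PySem.List.pyGetD keys i 0) = some [] from rfl, hout]

-- ===== VERDICT (by name: the statement is the Claim_ definition above) =====
theorem encrypt_xor_with_changing_key_by_prev_cipher_longer_key_spec : Claim_equal_encrypt_xor_with_changing_key_by_prev_cipher_longer_key := by
  intro message key_list mode hdom hpre
  unfold Spec_encrypt_xor_with_changing_key_by_prev_cipher_longer_key
  simp only [encrypt_xor_with_changing_key_by_prev_cipher_longer_key,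
    encrypt_xor_with_changing_key_by_prev_cipher_longer_key_alt]
  rcases hpre with hemp | ⟨hkne, hmode, hkeys⟩
  · -- empty message: both sides return ""
    obtain ⟨out, hout⟩ := ciphersA_nil mode
      ((PySem.List.pyRange 0 (key_list.length : Int) 1).map
        (fun i => (PySem.List.slice? ([] : List Char) (some i) none (key_list.length : Int)).getD []))
      key_list
      (by
        intro l hl
        obtain ⟨i, hi, hli⟩ := List.mem_map.mp hl
        have hmem := PySem.List.mem_pyRange_one.mp hi
        obtain ⟨knat, rfl⟩ : ∃ m : Nat, i = (m : Int) := ⟨i.toNat, by omega⟩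
        have hKpos : 0 < key_list.length := by
          have := hmem.2; omega
        rw [slice?_everyK [] knat key_list.length hKpos] at hli
        simp only [List.drop_nil, Option.getD_some] at hli
        rw [← hli, everyK])
      (PySem.List.pyRange 0 (key_list.length : Int) 1)
    simp only [hemp, List.length_nil, Nat.cast_zero, hout]
    rw [PySem.List.pyRange_one_eq_nil (le_refl 0)]
    rfl
  · -- nonempty key_list, known mode, good keys
    have hKpos : 0 < key_list.length := List.length_pos_iff.mpr hkne
    obtain ⟨enc, hm⟩ : ∃ enc : Bool,
        (mode = "encrypt" ∧ enc = true) ∨ (mode = "decrypt" ∧ enc = false) := by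
      rcases hmode with h | h
      · exact ⟨true, Or.inl ⟨h, rfl⟩⟩
      · exact ⟨false, Or.inr ⟨h, rfl⟩⟩
    have hokmsg : pvOkMsg message.toList := by
      apply dom_okMsg
      unfold Dom_encrypt_xor_with_changing_key_by_prev_cipher_longer_key at hdom
      simp only [Bool.and_eq_true] at hdom
      exact hdom.1.1
    have hok : ∀ k ∈ key_list, pvOk k := hkeys
    have hchunks : ((PySem.List.pyRange 0 (key_list.length : Int) 1).map
        (fun i => (PySem.List.slice? message.toList (some i) none (key_list.length : Int)).getD []))
        = (List.range key_list.length).map (fun c => everyK key_list.length (message.toList.drop c)) := by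
      rw [PySem.List.pyRange_zero_nat, List.map_map]
      apply List.map_congr_left
      intro c _
      simp only [Function.comp_apply]
      rw [slice?_everyK message.toList c key_list.length hKpos]
      rfl
    have hcphiter : pvCiphersA mode
        ((List.range key_list.length).map (fun c => everyK key_list.length (message.toList.drop c)))
        key_list (PySem.List.pyRange 0 (key_list.length : Int) 1)
        = some (ciphersT enc key_list.length message.toList key_list) := by
      rw [PySem.List.pyRange_zero_nat]
      rw [ciphersA_eq mode enc hm _ _ (List.range key_list.length) ?side]
      case side =>
        intro c hc
        have hcK : c < key_list.length := List.mem_range.mp hc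
        rw [PySem.List.getD_map_range _ key_list.length c [] hcK]
        refine ⟨?_, ?_⟩
        · rw [List.getD_eq_getElem _ _ hcK]
          exact hok _ (List.getElem_mem hcK)
        · intro x hx
          exact hokmsg x (List.mem_of_mem_drop (mem_everyK key_list.length _ x hx))
      congr 1
      unfold ciphersT
      apply List.map_congr_left
      intro c hc
      rw [PySem.List.getD_map_range _ key_list.length c [] (List.mem_range.mp hc)]
    have hciphlen : (ciphersT enc key_list.length message.toList key_list).length = key_list.length := by
      simp [ciphersT]
    have hassemble : pvAssembleA (ciphersT enc key_list.length message.toList key_list)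
        (key_list.length : Int) (PySem.List.pyRange 0 (message.toList.length : Int) 1)
        = some (interT message.toList.length key_list.length
            (ciphersT enc key_list.length message.toList key_list)) := by
      rw [PySem.List.pyRange_zero_nat]
      rw [assembleA_eq _ key_list.length hKpos (List.range message.toList.length) ?bnd]
      case bnd =>
        intro i hi
        have hin : i < message.toList.length := List.mem_range.mp hi
        have hcK : i % key_list.length < key_list.length := Nat.mod_lt _ hKpos
        refine ⟨by rw [hciphlen]; exact hcK, ?_⟩
        rw [show (ciphersT enc key_list.length message.toList key_list).getD (i % key_list.length) []
            = chainT enc (everyK key_list.length (message.toList.drop (i % key_list.length)))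
                (key_list.getD (i % key_list.length) 0) from
          PySem.List.getD_map_range _ key_list.length (i % key_list.length) [] hcK]
        rw [length_chainT, length_everyK key_list.length hKpos]
        simp only [List.length_drop]
        have hdm := Nat.div_add_mod i key_list.length
        have hstep : i / key_list.length + 1
            ≤ (message.toList.length - i % key_list.length + key_list.length - 1) / key_list.length := by
          rw [Nat.le_div_iff_mul_le hKpos]
          have e : (i / key_list.length + 1) * key_list.length
              = key_list.length * (i / key_list.length) + key_list.length := by ring
          omega
        omega
      rfl
    simp only [hchunks, hcphiter, hassemble]
    rw [altLoop_eq_rotC mode enc hm message.toList 0 key_list hKpos hok hokmsg]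
    rw [Nat.zero_mod, List.rotate_zero]
    rw [interT_eq_rotC enc message.toList key_list hkne]
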